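-- pv_equiv track=rewrite | github.com/vaughn-k/Algorithm | baekjoon/2020/bj1028.py | check
-- ===== SOURCE A (Python) =====
-- def check(answer,dia,n,i,j):
--     i,j = i,j+(n-1)
--     total = n*4 - 4
--     tmp1,tmp2,tmp3,tmp4 = 0,0,0,0
--     if(n == 1):
--         if(dia[i][j] == '1'):
--             return 1
--         else:
--             return 0
--     for a in range(total):
--         if(dia[i][j] == '0'):
--             return 0
--         if(a < total//4):
--             i,j = i+1,j+1
--             tmp1 = tmp1+1
--             if(answer[i][j][0] < tmp1):
--                 answer[i][j][0] = tmp1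
--         elif(a < (total//4)*2):
--             i,j = i+1,j-1
--             tmp2 = tmp2+1
--             if(answer[i][j][1] < tmp2):
--                 answer[i][j][1] = tmp2
--         elif(a < (total//4)*3):
--             i,j = i-1,j-1
--             tmp3 = tmp3+1
--             if(answer[i][j][2] < tmp3):
--                 answer[i][j][2] = tmp3
--         else:
--             i,j = i-1,j+1
--             tmp4 = tmp4+1
--             if(answer[i][j][3] < tmp4):
--                 answer[i][j][3] = tmp4
--     return 1
-- ===== SOURCE B (Python) =====
-- def check(answer, dia, n, i, j):
--     # Computes A's RETURN value only: unlike A it does not update the `answer` DP table.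
--     j += n - 1
--     if n == 1:
--         return 1 if dia[i][j] == '1' else 0
--     q = n - 1
--     ring = ([(i + t, j + t) for t in range(q)]
--             + [(i + q + t, j + q - t) for t in range(q)]
--             + [(i + 2 * q - t, j - t) for t in range(q)]
--             + [(i + q - t, j - q + t) for t in range(q)])
--     for r, c in ring:
--         if dia[r][c] == '0':
--             return 0
--     return 1
-- ===== Notes on version B (the rewrite author's own statement) =====
-- stated objective: simpler
-- what changed: A's stateful perimeter walk with four streak counters and in-place DP max-updates of `answer` is replaced by closed-form generation of the perimeter coordinates (four comprehensions) followed by a pure scan for a '0' cell; B computes only the return value and does not mutate `answer` (A does, in place).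
import Mathlib
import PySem

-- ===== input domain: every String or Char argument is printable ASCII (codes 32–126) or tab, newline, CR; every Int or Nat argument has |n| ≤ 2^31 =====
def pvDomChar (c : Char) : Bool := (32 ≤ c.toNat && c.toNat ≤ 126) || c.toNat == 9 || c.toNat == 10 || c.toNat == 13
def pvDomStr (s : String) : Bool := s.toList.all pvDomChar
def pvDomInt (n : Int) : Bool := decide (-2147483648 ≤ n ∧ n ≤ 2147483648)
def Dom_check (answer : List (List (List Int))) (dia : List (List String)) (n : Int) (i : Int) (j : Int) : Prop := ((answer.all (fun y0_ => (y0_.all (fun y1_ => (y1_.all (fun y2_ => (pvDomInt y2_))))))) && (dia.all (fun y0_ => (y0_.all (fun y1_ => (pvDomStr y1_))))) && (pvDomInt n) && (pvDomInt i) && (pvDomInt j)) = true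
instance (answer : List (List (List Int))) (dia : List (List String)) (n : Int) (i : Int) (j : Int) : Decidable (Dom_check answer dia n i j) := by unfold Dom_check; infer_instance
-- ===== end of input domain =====

-- B replaces A's stateful perimeter walk (four streak counters, in-place DP max-updates of
-- `answer`) by closed-form generation of the perimeter coordinates and a pure scan for a '0'
-- cell; A mutates `answer` in place and B does not, so the equivalence proved here is about
-- the RETURN value only.

-- shared port of the Python indexing expression dia[i][j] (both sources contain it verbatim)
def cellStr (dia : List (List String)) (i j : Int) : String :=
  PySem.List.pyGetD (PySem.List.pyGetD dia i []) j ""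

-- ===== PORT A =====
-- A's in-place statement `if answer[i][j][s] < c: answer[i][j][s] = c`
def ansGet (answer : List (List (List Int))) (i j s : Int) : Int :=
  PySem.List.pyGetD (PySem.List.pyGetD (PySem.List.pyGetD answer i []) j []) s 0

def ansSet (answer : List (List (List Int))) (i j s : Int) (v : Int) : List (List (List Int)) :=
  let row := PySem.List.pyGetD answer i []
  let cell := PySem.List.pyGetD row j []
  PySem.List.pySetD answer i (PySem.List.pySetD row j (PySem.List.pySetD cell s v))

def bump (answer : List (List (List Int))) (i j s c : Int) : List (List (List Int)) :=
  if ansGet answer i j s < c then ansSet answer i j s c else answer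

-- A's for-loop over range(total), branching on the index against total//4 thresholds,
-- threading the mutated table and the four counters tmp1..tmp4; early `return 0` stops it.
def loopA (dia : List (List String)) (q : Int) (as_ : List Int)
    (answer : List (List (List Int))) (i j t1 t2 t3 t4 : Int) : Int :=
  match as_ with
  | [] => 1
  | a :: rest =>
    if cellStr dia i j == "0" then 0
    else if a < q then
      loopA dia q rest (bump answer (i+1) (j+1) 0 (t1+1)) (i+1) (j+1) (t1+1) t2 t3 t4
    else if a < q*2 then
      loopA dia q rest (bump answer (i+1) (j-1) 1 (t2+1)) (i+1) (j-1) t1 (t2+1) t3 t4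
    else if a < q*3 then
      loopA dia q rest (bump answer (i-1) (j-1) 2 (t3+1)) (i-1) (j-1) t1 t2 (t3+1) t4
    else
      loopA dia q rest (bump answer (i-1) (j+1) 3 (t4+1)) (i-1) (j+1) t1 t2 t3 (t4+1)

def check (answer : List (List (List Int))) (dia : List (List String)) (n : Int) (i : Int) (j : Int) : Int :=
  let j := j + (n - 1)
  let total := n*4 - 4
  if n = 1 then
    if cellStr dia i j == "1" then 1 else 0
  else
    loopA dia (PySem.Int.floordiv total 4) (PySem.List.pyRange 0 total 1) answer i j 0 0 0 0

-- ===== PORT B =====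
-- B's four list comprehensions producing the perimeter coordinates
def ringCoords (q i j : Int) : List (Int × Int) :=
  ((List.range q.toNat).map fun (t : Nat) => (i + (t:Int), j + (t:Int))) ++
  ((List.range q.toNat).map fun (t : Nat) => (i + q + (t:Int), j + q - (t:Int))) ++
  ((List.range q.toNat).map fun (t : Nat) => (i + 2*q - (t:Int), j - (t:Int))) ++
  ((List.range q.toNat).map fun (t : Nat) => (i + q - (t:Int), j - q + (t:Int)))

-- B's `for r, c in ring:` scan with early `return 0`
def scanB (dia : List (List String)) : List (Int × Int) → Int
  | [] => 1
  | (r, c) :: rest => if cellStr dia r c == "0" then 0 else scanB dia rest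

def check_alt (answer : List (List (List Int))) (dia : List (List String)) (n : Int) (i : Int) (j : Int) : Int :=
  let j := j + (n - 1)
  if n = 1 then
    if cellStr dia i j == "1" then 1 else 0
  else
    scanB dia (ringCoords (n - 1) i j)

-- ===== PRECONDITION & SPEC =====
-- Python-index validity: -len ≤ k < len (negative indices wrap)
def okIdx (len : Nat) (k : Int) : Bool := decide (-(len:Int) ≤ k ∧ k < (len:Int))

-- the u-th perimeter cell (closed form of A's position after u steps), q = n-1
def coordAt (i j : Int) (q u : Nat) : Int × Int :=
  if u ≤ q then (i + (u:Int), j + (u:Int))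
  else if u ≤ 2*q then (i + (u:Int), j + 2*(q:Int) - (u:Int))
  else if u ≤ 3*q then (i + 4*(q:Int) - (u:Int), j + 2*(q:Int) - (u:Int))
  else (i + 4*(q:Int) - (u:Int), j - 4*(q:Int) + (u:Int))

def diaOKat (dia : List (List String)) (p : Int × Int) : Bool :=
  okIdx dia.length p.1 && okIdx (PySem.List.pyGetD dia p.1 []).length p.2

def diaValAt (dia : List (List String)) (p : Int × Int) : String :=
  PySem.List.pyGetD (PySem.List.pyGetD dia p.1 []) p.2 ""

-- validity of A's access answer[p][slot] (slot ∈ {0,1,2,3})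
def ansOKat (answer : List (List (List Int))) (p : Int × Int) (slot : Nat) : Bool :=
  okIdx answer.length p.1 && okIdx (PySem.List.pyGetD answer p.1 []).length p.2 &&
  decide (slot < (PySem.List.pyGetD (PySem.List.pyGetD answer p.1 []) p.2 []).length)

-- iteration t of A completes without raising and without returning
def goodAt (answer : List (List (List Int))) (dia : List (List String)) (i j : Int) (q t : Nat) : Bool :=
  diaOKat dia (coordAt i j q t) && !(diaValAt dia (coordAt i j q t) == "0") &&
  ansOKat answer (coordAt i j q (t+1)) (t / q)

def preOk (answer : List (List (List Int))) (dia : List (List String)) (n i j : Int) : Bool :=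
  if n = 1 then diaOKat dia (i, j + (n-1))
  else if n ≤ 0 then true
  else
    -- iterations beyond `cap` are vacuous: reaching them needs more than 2*dia.length
    -- distinct valid row indices, which cannot exist, so the prefix hypothesis fails there
    let q := (n-1).toNat
    let cap := if q ≤ dia.length then 4*q else min (4*q) (2*dia.length+1)
    (List.range cap).all fun u =>
      !((List.range u).all (goodAt answer dia i (j + (n-1)) q)) ||
      (diaOKat dia (coordAt i (j + (n-1)) q u) &&
        (diaValAt dia (coordAt i (j + (n-1)) q u) == "0" ||
          ansOKat answer (coordAt i (j + (n-1)) q (u+1)) (u / q)))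

-- Pre_ is exactly the inputs on which Python A returns (anything else raises IndexError):
-- every iteration that is reached finds its dia cell in range and, unless that cell is '0'
-- (A returns 0 there), its answer access in range as well.
def Pre_check (answer : List (List (List Int))) (dia : List (List String)) (n : Int) (i : Int) (j : Int) : Prop :=
  preOk answer dia n i j = true
instance (answer : List (List (List Int))) (dia : List (List String)) (n : Int) (i : Int) (j : Int) : Decidable (Pre_check answer dia n i j) := by unfold Pre_check; infer_instance

def pvWitness_check : List (List (List Int)) × List (List String) × Int × Int × Int :=
  ([[[0,0,0,0],[0,0,0,0],[0,0,0,0]],[[0,0,0,0],[0,0,0,0],[0,0,0,0]],[[0,0,0,0],[0,0,0,0],[0,0,0,0]]],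
   [["1","1","1"],["1","1","1"],["1","1","1"]], 2, 0, 0)

def Spec_check (answer : List (List (List Int))) (dia : List (List String)) (n : Int) (i : Int) (j : Int) (out : Int) : Prop := out = check_alt answer dia n i j
instance (answer : List (List (List Int))) (dia : List (List String)) (n : Int) (i : Int) (j : Int) (out : Int) : Decidable (Spec_check answer dia n i j out) := by unfold Spec_check; infer_instance

-- ===== CLAIM (what is proved, stated in full; the proofs are below) =====
def Claim_equal_check : Prop := ∀ (answer : List (List (List Int))) (dia : List (List String)) (n : Int) (i : Int) (j : Int), Dom_check answer dia n i j → Pre_check answer dia n i j → Spec_check answer dia n i j (check answer dia n i j)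

-- ===== LEMMAS AND PROOFS =====

-- proof-only: the Int view of a Nat index list
def intsOf (l : List Nat) : List Int := l.map (fun (k : Nat) => (k : Int))

lemma intsOf_cons (a : Nat) (l : List Nat) : intsOf (a :: l) = (a : Int) :: intsOf l := rfl

lemma intsOf_append (l r : List Nat) : intsOf (l ++ r) = intsOf l ++ intsOf r := by
  unfold intsOf; exact List.map_append ..

-- proof-only: m cells of a diagonal ray from (i,j) in direction (di,dj)
def ray (i j di dj : Int) : Nat → List (Int × Int)
  | 0 => []
  | m + 1 => (i, j) :: ray (i + di) (j + dj) di dj m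

lemma ray_eq_map (di dj : Int) : ∀ (m : Nat) (i j : Int),
    ray i j di dj m = (List.range m).map fun (t : Nat) => (i + di * (t:Int), j + dj * (t:Int)) := by
  intro m
  induction m with
  | zero => intro i j; simp [ray]
  | succ m ih =>
    intro i j
    rw [List.range_succ_eq_map, List.map_cons, List.map_map]
    rw [ray, ih]
    congr 1
    · simp
    · apply List.map_congr_left
      intro t _
      simp only [Function.comp_apply, Prod.mk.injEq]
      constructor <;> push_cast <;> ring

lemma edge0 (dia : List (List String)) (q' : Nat) :
    ∀ (m s : Nat), s + m = q' →
    ∀ ans i j t2 t3 t4 rest C,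
    (∀ ans', loopA dia (q':Int) rest ans' (i + (m:Int)) (j + (m:Int)) (q':Int) t2 t3 t4 = scanB dia C) →
    loopA dia (q':Int) (intsOf (List.range' s m) ++ rest) ans i j (s:Int) t2 t3 t4
      = scanB dia (ray i j 1 1 m ++ C) := by
  intro m
  induction m with
  | zero =>
    intro s hs ans i j t2 t3 t4 rest C hC
    obtain rfl : s = q' := by omega
    simpa [intsOf, ray] using hC ans
  | succ m ih =>
    intro s hs ans i j t2 t3 t4 rest C hC
    rw [List.range'_succ, intsOf_cons, List.cons_append]
    simp only [loopA, ray, List.cons_append, scanB]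
    by_cases hc : cellStr dia i j == "0"
    · simp [hc]
    · simp only [hc, Bool.false_eq_true, if_false]
      rw [if_pos (by exact_mod_cast (by omega : s < q'))]
      refine ih (s+1) (by omega) _ (i+1) (j+1) t2 t3 t4 rest C ?_
      intro ans'
      have h1 : i + 1 + (m:Int) = i + ((m+1:Nat):Int) := by push_cast; ring
      have h2 : j + 1 + (m:Int) = j + ((m+1:Nat):Int) := by push_cast; ring
      rw [h1, h2]; exact hC ans'

lemma edge1 (dia : List (List String)) (q' : Nat) :
    ∀ (m s : Nat), s + m = q' →
    ∀ ans i j t1 t3 t4 rest C,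
    (∀ ans', loopA dia (q':Int) rest ans' (i + (m:Int)) (j - (m:Int)) t1 (q':Int) t3 t4 = scanB dia C) →
    loopA dia (q':Int) (intsOf (List.range' (q'+s) m) ++ rest) ans i j t1 (s:Int) t3 t4
      = scanB dia (ray i j 1 (-1) m ++ C) := by
  intro m
  induction m with
  | zero =>
    intro s hs ans i j t1 t3 t4 rest C hC
    obtain rfl : s = q' := by omega
    simpa [intsOf, ray] using hC ans
  | succ m ih =>
    intro s hs ans i j t1 t3 t4 rest C hC
    rw [List.range'_succ, intsOf_cons, List.cons_append]
    simp only [loopA, ray, List.cons_append, scanB]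
    by_cases hc : cellStr dia i j == "0"
    · simp [hc]
    · simp only [hc, Bool.false_eq_true, if_false]
      rw [if_neg (by push_cast; omega : ¬ (((q'+s : Nat) : Int) < (q':Int)))]
      rw [if_pos (by push_cast; omega : ((q'+s : Nat) : Int) < (q':Int)*2)]
      have key := ih (s+1) (by omega) (bump ans (i+1) (j-1) 1 ((s:Int)+1)) (i+1) (j-1) t1 t3 t4 rest C ?_
      · rw [(by omega : q' + (s+1) = q' + s + 1)] at key
        push_cast at key ⊢
        convert key using 3
      · intro ans'
        have h1 : i + 1 + (m:Int) = i + ((m+1:Nat):Int) := by push_cast; ring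
        have h2 : j - 1 - (m:Int) = j - ((m+1:Nat):Int) := by push_cast; ring
        rw [h1, h2]; exact hC ans'

lemma edge2 (dia : List (List String)) (q' : Nat) :
    ∀ (m s : Nat), s + m = q' →
    ∀ ans i j t1 t2 t4 rest C,
    (∀ ans', loopA dia (q':Int) rest ans' (i - (m:Int)) (j - (m:Int)) t1 t2 (q':Int) t4 = scanB dia C) →
    loopA dia (q':Int) (intsOf (List.range' (q'+q'+s) m) ++ rest) ans i j t1 t2 (s:Int) t4
      = scanB dia (ray i j (-1) (-1) m ++ C) := by
  intro m
  induction m with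
  | zero =>
    intro s hs ans i j t1 t2 t4 rest C hC
    obtain rfl : s = q' := by omega
    simpa [intsOf, ray] using hC ans
  | succ m ih =>
    intro s hs ans i j t1 t2 t4 rest C hC
    rw [List.range'_succ, intsOf_cons, List.cons_append]
    simp only [loopA, ray, List.cons_append, scanB]
    by_cases hc : cellStr dia i j == "0"
    · simp [hc]
    · simp only [hc, Bool.false_eq_true, if_false]
      rw [if_neg (by push_cast; omega : ¬ (((q'+q'+s : Nat) : Int) < (q':Int)))]
      rw [if_neg (by push_cast; omega : ¬ (((q'+q'+s : Nat) : Int) < (q':Int)*2))]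
      rw [if_pos (by push_cast; omega : ((q'+q'+s : Nat) : Int) < (q':Int)*3)]
      have key := ih (s+1) (by omega) (bump ans (i-1) (j-1) 2 ((s:Int)+1)) (i-1) (j-1) t1 t2 t4 rest C ?_
      · rw [(by omega : q' + q' + (s+1) = q' + q' + s + 1)] at key
        push_cast at key ⊢
        convert key using 3
      · intro ans'
        have h1 : i - 1 - (m:Int) = i - ((m+1:Nat):Int) := by push_cast; ring
        have h2 : j - 1 - (m:Int) = j - ((m+1:Nat):Int) := by push_cast; ring
        rw [h1, h2]; exact hC ans'

lemma edge3 (dia : List (List String)) (q' : Nat) :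
    ∀ (m s : Nat), s + m = q' →
    ∀ ans i j t1 t2 t3 rest C,
    (∀ ans', loopA dia (q':Int) rest ans' (i - (m:Int)) (j + (m:Int)) t1 t2 t3 (q':Int) = scanB dia C) →
    loopA dia (q':Int) (intsOf (List.range' (q'+q'+q'+s) m) ++ rest) ans i j t1 t2 t3 (s:Int)
      = scanB dia (ray i j (-1) 1 m ++ C) := by
  intro m
  induction m with
  | zero =>
    intro s hs ans i j t1 t2 t3 rest C hC
    obtain rfl : s = q' := by omega
    simpa [intsOf, ray] using hC ans
  | succ m ih =>
    intro s hs ans i j t1 t2 t3 rest C hC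
    rw [List.range'_succ, intsOf_cons, List.cons_append]
    simp only [loopA, ray, List.cons_append, scanB]
    by_cases hc : cellStr dia i j == "0"
    · simp [hc]
    · simp only [hc, Bool.false_eq_true, if_false]
      rw [if_neg (by push_cast; omega : ¬ (((q'+q'+q'+s : Nat) : Int) < (q':Int)))]
      rw [if_neg (by push_cast; omega : ¬ (((q'+q'+q'+s : Nat) : Int) < (q':Int)*2))]
      rw [if_neg (by push_cast; omega : ¬ (((q'+q'+q'+s : Nat) : Int) < (q':Int)*3))]
      have key := ih (s+1) (by omega) (bump ans (i-1) (j+1) 3 ((s:Int)+1)) (i-1) (j+1) t1 t2 t3 rest C ?_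
      · rw [(by omega : q' + q' + q' + (s+1) = q' + q' + q' + s + 1)] at key
        push_cast at key ⊢
        convert key using 3
      · intro ans'
        have h1 : i - 1 - (m:Int) = i - ((m+1:Nat):Int) := by push_cast; ring
        have h2 : j + 1 + (m:Int) = j + ((m+1:Nat):Int) := by push_cast; ring
        rw [h1, h2]; exact hC ans'

lemma ring_decomp (n i j : Int) (q' : Nat) (hq : ((q':Nat):Int) = n - 1) :
    ringCoords (n-1) i j
      = ray i j 1 1 q' ++ (ray (i + (q':Int)) (j + (q':Int)) 1 (-1) q'
        ++ (ray (i + (q':Int) + (q':Int)) (j + (q':Int) - (q':Int)) (-1) (-1) q'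
        ++ (ray (i + (q':Int) + (q':Int) - (q':Int)) (j + (q':Int) - (q':Int) - (q':Int)) (-1) 1 q' ++ []))) := by
  have ht : (n-1).toNat = q' := by omega
  have R1 : ray i j 1 1 q'
      = (List.range q').map fun (t : Nat) => (i + (t:Int), j + (t:Int)) := by
    rw [ray_eq_map]
    apply List.map_congr_left; intro t _
    simp only [Prod.mk.injEq]; constructor <;> ring
  have R2 : ray (i + (q':Int)) (j + (q':Int)) 1 (-1) q'
      = (List.range q').map fun (t : Nat) => (i + (q':Int) + (t:Int), j + (q':Int) - (t:Int)) := by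
    rw [ray_eq_map]
    apply List.map_congr_left; intro t _
    simp only [Prod.mk.injEq]; constructor <;> ring
  have R3 : ray (i + (q':Int) + (q':Int)) (j + (q':Int) - (q':Int)) (-1) (-1) q'
      = (List.range q').map fun (t : Nat) => (i + 2*(q':Int) - (t:Int), j - (t:Int)) := by
    rw [ray_eq_map]
    apply List.map_congr_left; intro t _
    simp only [Prod.mk.injEq]; constructor <;> ring
  have R4 : ray (i + (q':Int) + (q':Int) - (q':Int)) (j + (q':Int) - (q':Int) - (q':Int)) (-1) 1 q'
      = (List.range q').map fun (t : Nat) => (i + (q':Int) - (t:Int), j - (q':Int) + (t:Int)) := by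
    rw [ray_eq_map]
    apply List.map_congr_left; intro t _
    simp only [Prod.mk.injEq]; constructor <;> ring
  rw [R1, R2, R3, R4]
  unfold ringCoords
  rw [ht, ← hq]
  simp [List.append_assoc]

lemma ports_agree (answer : List (List (List Int))) (dia : List (List String)) (n i j : Int) :
    check answer dia n i j = check_alt answer dia n i j := by
  by_cases h1 : n = 1
  · simp [check, check_alt, h1]
  · by_cases h0 : n ≤ 0
    · have hr : PySem.List.pyRange 0 (n*4-4) 1 = [] :=
        PySem.List.pyRange_one_eq_nil (by omega)
      have ht : (n-1).toNat = 0 := by omega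
      simp [check, check_alt, h1, hr, ringCoords, ht, loopA, scanB]
    · have hn2 : 2 ≤ n := by omega
      set q' : Nat := (n-1).toNat with hq'
      have hqc : ((q':Nat) : Int) = n - 1 := by omega
      have hq : PySem.Int.floordiv (n*4-4) 4 = ((q':Nat) : Int) := by
        rw [PySem.Int.floordiv_eq_ediv_of_pos (by omega)]
        omega
      have hsplit : List.range' 0 (4*q') =
          List.range' 0 q' ++ (List.range' q' q' ++ (List.range' (q'+q') q' ++ List.range' (q'+q'+q') q')) := by
        have A3 := @List.range'_append (q'+q') q' q' 1
        have A2 := @List.range'_append q' q' (q'+q') 1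
        have A1 := @List.range'_append 0 q' (q'+(q'+q')) 1
        simp only [one_mul, zero_add] at A1 A2 A3
        rw [A3, A2, A1]
        congr 1
        omega
      have hr : PySem.List.pyRange 0 (n*4-4) 1 =
          intsOf (List.range' 0 q') ++ (intsOf (List.range' q' q')
            ++ (intsOf (List.range' (q'+q') q') ++ intsOf (List.range' (q'+q'+q') q'))) := by
        rw [PySem.List.pyRange_one, List.range_eq_range',
            (by omega : ((n*4-4) - 0).toNat = 4*q'), hsplit]
        simp only [zero_add]
        show intsOf (List.range' 0 q' ++ (List.range' q' q' ++ (List.range' (q'+q') q' ++ List.range' (q'+q'+q') q'))) = _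
        rw [intsOf_append, intsOf_append, intsOf_append]
      unfold check check_alt
      simp only [h1, if_false, hq, hr]
      rw [ring_decomp n i (j + (n-1)) q' hqc]
      have e0 := edge0 dia q' q' 0 (by omega) answer i (j + (n-1)) 0 0 0
      have e1 := edge1 dia q' q' 0 (by omega)
      have e2 := edge2 dia q' q' 0 (by omega)
      have e3 := edge3 dia q' q' 0 (by omega)
      simp only [Nat.cast_zero, Nat.add_zero] at e0 e1 e2 e3
      refine e0 _ _ ?_
      intro a1
      refine e1 a1 (i + (q':Int)) (j + (n-1) + (q':Int)) (q':Int) 0 0 _ _ ?_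
      intro a2
      refine e2 a2 (i + (q':Int) + (q':Int)) (j + (n-1) + (q':Int) - (q':Int)) (q':Int) (q':Int) 0 _ _ ?_
      intro a3
      have h := e3 a3 (i + (q':Int) + (q':Int) - (q':Int)) (j + (n-1) + (q':Int) - (q':Int) - (q':Int)) (q':Int) (q':Int) (q':Int) [] []
        (fun _ => by simp [loopA, scanB])
      simpa using h

-- ===== VERDICT (by name: the statement is the Claim_ definition above) =====
theorem check_spec : Claim_equal_check := by
  intro answer dia n i j _ _
  unfold Spec_check
  exact ports_agree answer dia n i j
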